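-- pv_equiv track=rewrite | github.com/mnigmann/reverse-engineering | find_loops.py | find_connected_runs
-- ===== SOURCE A (Python) =====
-- def find_connected_line(arr, rn, cn):
--     width = len(arr[0])
--     start = 0
--     stop = width
--     for x in range(cn + 1, width):
--         if arr[rn][x] != 1:
--             stop = x
--             break
--     for x in range(cn-1, -1, -1):
--         if arr[rn][x] != 1:
--             start = x+1
--             break
--     return start, stop
--
-- def find_connected_runs(arr, rn, run):
--     """
--     Find runs in row rn+1 that are touching the given run located in row rn
--     :param arr: a 2D array of ones and zeros
--     :param rn: the index of the rown containing run
--     :param run: an tuple of the form (start, stop) representing the initial run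
--     :return: a list of runs
--     """
--     res = []
--     x = max(0, run[0]-1)
--     while x < min(len(arr[0])-1, run[1]+1):
--         if arr[rn+1][x]:
--             new_run = find_connected_line(arr, rn+1, x)
--             x = new_run[1]
--             res.append(new_run)
--         else: x += 1
--     return res
-- ===== SOURCE B (Python) =====
-- def _run_lengths(seg):
--     # out[i] = length of the run of consecutive 1s starting at index i of seg
--     out = [0] * (len(seg) + 1)
--     for i in range(len(seg) - 1, -1, -1):
--         out[i] = out[i + 1] + 1 if seg[i] == 1 else 0
--     return out
--
--
-- def find_connected_runs(arr, rn, run):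
--     width = len(arr[0])
--     x = max(0, run[0] - 1)
--     xhi = min(width - 1, run[1] + 1)
--     if x >= xhi:
--         return []
--     seg = arr[rn + 1][:width]
--     rgt = _run_lengths(seg)              # 1s to the right including i
--     lft = _run_lengths(seg[::-1])[::-1]  # lft[i] = 1s immediately before index i
--     res = []
--     while x < xhi:
--         if seg[x]:
--             stop = x + 1 + rgt[x + 1]
--             res.append((x - lft[x], stop))
--             x = stop
--         else:
--             x += 1
--     return res
-- ===== Notes on version B (the rewrite author's own statement) =====
-- stated objective: alternative
-- what changed: B precomputes run-length arrays (length of the 1-run starting at / ending before each index) in two linear passes of one reused helper, then emits each hit as (x-lft[x], x+1+rgt[x+1]) and jumps, replacing A's per-hit bidirectional rescans (find_connected_line) with O(1) table lookups.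
-- outside the precondition, e.g. on find_connected_runs([[1, 1], [0]], 0, (0, 0)): A returns [], B returns []
import Mathlib
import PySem

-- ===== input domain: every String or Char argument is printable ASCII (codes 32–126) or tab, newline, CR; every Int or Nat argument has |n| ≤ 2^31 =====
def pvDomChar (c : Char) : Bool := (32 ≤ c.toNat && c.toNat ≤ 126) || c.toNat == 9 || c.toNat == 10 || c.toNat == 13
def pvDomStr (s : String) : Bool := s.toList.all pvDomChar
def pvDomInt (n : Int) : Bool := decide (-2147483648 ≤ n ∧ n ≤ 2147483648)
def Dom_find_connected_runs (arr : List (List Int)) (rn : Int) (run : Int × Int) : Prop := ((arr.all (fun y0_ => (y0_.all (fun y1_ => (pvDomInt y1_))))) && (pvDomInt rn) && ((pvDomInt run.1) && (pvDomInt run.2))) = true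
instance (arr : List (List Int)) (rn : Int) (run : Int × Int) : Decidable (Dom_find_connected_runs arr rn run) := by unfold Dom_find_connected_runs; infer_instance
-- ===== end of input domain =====

-- B replaces A's per-hit bidirectional rescans with two precomputed run-length tables (one helper used twice) and O(1) lookups; equivalence on Pre_ is proved.

-- ===== PORT A =====
-- 'for x in range(cn+1, width): if arr[rn][x] != 1: stop = x; break' (stop initialised to width)
def scanStopA (r : List Int) (width x : Int) : Int :=
  if _h : x < width then
    if PySem.List.pyGetD r x 0 ≠ 1 then x else scanStopA r width (x + 1)
  else width
termination_by (width - x).toNat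
decreasing_by omega

-- 'start = 0; for x in range(cn-1, -1, -1): if arr[rn][x] != 1: start = x+1; break'
def scanStartA (r : List Int) (x : Int) : Int :=
  if _h : 0 ≤ x then
    if PySem.List.pyGetD r x 0 ≠ 1 then x + 1 else scanStartA r (x - 1)
  else 0
termination_by (x + 1).toNat
decreasing_by omega

def find_connected_line (arr : List (List Int)) (rn cn : Int) : Int × Int :=
  (scanStartA (PySem.List.pyGetD arr rn []) (cn - 1),
   scanStopA (PySem.List.pyGetD arr rn []) ((PySem.List.pyGetD arr 0 []).length : Int) (cn + 1))

-- termination helper for the while loop (the new x is past the scanned position)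
theorem scanStopA_gt (r : List Int) (width x : Int) (h : x ≤ width) : x ≤ scanStopA r width x := by
  by_cases hx : x < width
  · rw [scanStopA]
    rw [dif_pos hx]
    split
    · omega
    · have := scanStopA_gt r width (x + 1) (by omega)
      omega
  · rw [scanStopA]
    rw [dif_neg hx]
    omega
termination_by (width - x).toNat
decreasing_by omega

-- 'while x < min(len(arr[0])-1, run[1]+1): …'
def loopA (arr : List (List Int)) (rn : Int) (run : Int × Int) (x : Int) (res : List (Int × Int)) : List (Int × Int) :=
  if _h : x < min (((PySem.List.pyGetD arr 0 []).length : Int) - 1) (run.2 + 1) then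
    if PySem.List.pyGetD (PySem.List.pyGetD arr (rn + 1) []) x 0 ≠ 0 then
      let nr := find_connected_line arr (rn + 1) x
      loopA arr rn run nr.2 (res ++ [nr])
    else loopA arr rn run (x + 1) res
  else res
termination_by (min (((PySem.List.pyGetD arr 0 []).length : Int) - 1) (run.2 + 1) - x).toNat
decreasing_by
  · have h2 := scanStopA_gt (PySem.List.pyGetD arr (rn + 1) []) ((PySem.List.pyGetD arr 0 []).length : Int) (x + 1) (by omega)
    simp only [find_connected_line]
    omega
  · omega

def find_connected_runs (arr : List (List Int)) (rn : Int) (run : Int × Int) : List (Int × Int) :=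
  loopA arr rn run (max 0 (run.1 - 1)) []

-- ===== PORT B =====
-- out[i] = length of the run of consecutive 1s starting at index i (right-to-left pass; length len+1)
def runLengths (seg : List Int) : List Nat :=
  match seg with
  | [] => [0]
  | a :: t => (if a = 1 then (runLengths t).headD 0 + 1 else 0) :: runLengths t

def loopB (seg : List Int) (lft rgt : List Nat) (xhi x : Int) (res : List (Int × Int)) : List (Int × Int) :=
  if _h : x < xhi then
    if PySem.List.pyGetD seg x 0 ≠ 0 then
      let stop : Int := x + 1 + (PySem.List.pyGetD rgt (x + 1) 0 : Nat)
      loopB seg lft rgt xhi stop (res ++ [(x - (PySem.List.pyGetD lft x 0 : Nat), stop)])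
    else loopB seg lft rgt xhi (x + 1) res
  else res
termination_by (xhi - x).toNat
decreasing_by
  · have : (0:Int) ≤ (PySem.List.pyGetD rgt (x + 1) 0 : Nat) := Int.natCast_nonneg _
    omega
  · omega

def find_connected_runs_alt (arr : List (List Int)) (rn : Int) (run : Int × Int) : List (Int × Int) :=
  if min (((PySem.List.pyGetD arr 0 []).length : Int) - 1) (run.2 + 1) ≤ max 0 (run.1 - 1) then []
  else
    loopB ((PySem.List.pyGetD arr (rn + 1) []).take (PySem.List.pyGetD arr 0 []).length)
      ((runLengths ((PySem.List.pyGetD arr (rn + 1) []).take (PySem.List.pyGetD arr 0 []).length).reverse).reverse)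
      (runLengths ((PySem.List.pyGetD arr (rn + 1) []).take (PySem.List.pyGetD arr 0 []).length))
      (min (((PySem.List.pyGetD arr 0 []).length : Int) - 1) (run.2 + 1)) (max 0 (run.1 - 1)) []

-- ===== PRECONDITION & SPEC =====
-- Pre_ excludes inputs where A hits an IndexError (arr empty, or a nonempty scan window with row rn+1
-- missing): when the window is nonempty it conservatively requires row rn+1 to exist and to be at least
-- as long as row 0, which also excludes some ragged inputs on which A happens to stop scanning before
-- the short row ends and returns normally.
def Pre_find_connected_runs (arr : List (List Int)) (rn : Int) (run : Int × Int) : Prop :=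
  arr ≠ [] ∧
  (min (((PySem.List.pyGetD arr 0 []).length : Int) - 1) (run.2 + 1) ≤ max 0 (run.1 - 1) ∨
   (PySem.Raise.InRange arr.length (rn + 1) ∧
    (PySem.List.pyGetD arr 0 []).length ≤ (PySem.List.pyGetD arr (rn + 1) []).length))
instance (arr : List (List Int)) (rn : Int) (run : Int × Int) : Decidable (Pre_find_connected_runs arr rn run) := by unfold Pre_find_connected_runs; infer_instance

def pvWitness_find_connected_runs : List (List Int) × Int × (Int × Int) := ([[1, 1, 0], [0, 1, 1]], 0, (0, 2))

def Spec_find_connected_runs (arr : List (List Int)) (rn : Int) (run : Int × Int) (out : List (Int × Int)) : Prop := out = find_connected_runs_alt arr rn run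
instance (arr : List (List Int)) (rn : Int) (run : Int × Int) (out : List (Int × Int)) : Decidable (Spec_find_connected_runs arr rn run out) := by unfold Spec_find_connected_runs; infer_instance

-- ===== CLAIM (what is proved, stated in full; the proofs are below) =====
def Claim_equal_find_connected_runs : Prop := ∀ (arr : List (List Int)) (rn : Int) (run : Int × Int), Dom_find_connected_runs arr rn run → Pre_find_connected_runs arr rn run → Spec_find_connected_runs arr rn run (find_connected_runs arr rn run)

-- ===== LEMMAS AND PROOFS =====

-- length of the run of consecutive 1s at the head (proof-only spec)
def runlen : List Int → Nat
  | [] => 0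
  | a :: t => if a = 1 then runlen t + 1 else 0

theorem runLengths_length (seg : List Int) : (runLengths seg).length = seg.length + 1 := by
  induction seg with
  | nil => simp [runLengths]
  | cons a t ih => simp [runLengths, ih]

theorem runLengths_getD (seg : List Int) : ∀ (i : Nat), (runLengths seg).getD i 0 = runlen (seg.drop i) := by
  induction seg with
  | nil => intro i; cases i <;> simp [runLengths, runlen]
  | cons a t ih =>
    intro i
    cases i with
    | zero =>
      have h0 := ih 0
      simp only [List.drop_zero] at h0
      have hh : (runLengths t).headD 0 = (runLengths t).getD 0 0 := by
        cases runLengths t <;> simp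
      simp only [runLengths, List.getD_cons_zero, List.drop_zero, runlen]
      rw [hh, h0]
    | succ j => simpa [runLengths] using ih j

theorem pyGetD_nonneg_nat {α : Type} (l : List α) (i : Int) (d : α) (h : 0 ≤ i) :
    PySem.List.pyGetD l i d = l.getD i.toNat d := by
  have hi : i = ((i.toNat : Nat) : Int) := by omega
  rw [hi, PySem.List.pyGetD_natCast]
  have hmax : (max i 0).toNat = i.toNat := by omega
  simp [List.getD_eq_getElem?_getD, hmax]

theorem stop_spec (row : List Int) (width : Nat) (x : Int)
    (hw : width ≤ row.length) (h0 : 0 ≤ x) (hx : x ≤ (width : Int)) :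
    scanStopA row (width : Int) x = x + (runlen ((row.take width).drop x.toNat) : Nat) := by
  by_cases hlt : x < (width : Int)
  · rw [scanStopA, dif_pos hlt]
    have hxn : x.toNat < width := by omega
    have hxr : x.toNat < row.length := by omega
    have hget : PySem.List.pyGetD row x 0 = row[x.toNat] := by
      rw [pyGetD_nonneg_nat row x 0 h0]
      simp [List.getD_eq_getElem?_getD, hxr]
    have hdrop : (row.take width).drop x.toNat = row[x.toNat] :: (row.take width).drop (x.toNat + 1) := by
      rw [List.drop_eq_getElem_cons (by simp; omega)]
      simp [List.getElem_take]
    split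
    · rename_i hne
      rw [hdrop]
      have : row[x.toNat] ≠ 1 := by rw [hget] at hne; exact hne
      simp [runlen, this]
    · rename_i heq
      have hv : row[x.toNat] = 1 := by rw [hget] at heq; simpa using heq
      have ih := stop_spec row width (x + 1) hw (by omega) (by omega)
      have hsucc : (x + 1).toNat = x.toNat + 1 := by omega
      rw [ih, hdrop, hsucc]
      simp [runlen, hv]
      omega
  · rw [scanStopA, dif_neg hlt]
    have hx' : x = (width : Int) := by omega
    have hnil : (row.take width).drop x.toNat = [] := by
      apply List.drop_of_length_le
      simp; omega
    rw [hnil, hx']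
    simp [runlen]
termination_by ((width : Int) - x).toNat
decreasing_by omega

theorem start_spec (row : List Int) (width : Nat) (x : Int)
    (hw : width ≤ row.length) (h0 : -1 ≤ x) (hx : x < (width : Int)) :
    scanStartA row x = (x + 1) - (runlen (((row.take width).take (x + 1).toNat).reverse) : Nat) := by
  by_cases hneg : 0 ≤ x
  · rw [scanStartA, dif_pos hneg]
    have hxn : x.toNat < width := by omega
    have hxr : x.toNat < row.length := by omega
    have hget : PySem.List.pyGetD row x 0 = row[x.toNat] := by
      rw [pyGetD_nonneg_nat row x 0 hneg]
      simp [List.getD_eq_getElem?_getD, hxr]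
    have hsucc : (x + 1).toNat = x.toNat + 1 := by omega
    have htake : ((row.take width).take (x.toNat + 1)) = (row.take width).take x.toNat ++ [row[x.toNat]] := by
      rw [List.take_add_one]
      congr 1
      have hsome : (row.take width)[x.toNat]? = some row[x.toNat] := by
        rw [List.getElem?_take_of_lt hxn]
        simp [hxr]
      simp [hsome]
    have hrev : (((row.take width).take (x + 1).toNat).reverse) = row[x.toNat] :: ((row.take width).take x.toNat).reverse := by
      rw [hsucc, htake]; simp
    split
    · rename_i hne
      have : row[x.toNat] ≠ 1 := by rw [hget] at hne; exact hne
      rw [hrev]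
      simp [runlen, this]
    · rename_i heq
      have hv : row[x.toNat] = 1 := by rw [hget] at heq; simpa using heq
      have ih := start_spec row width (x - 1) hw (by omega) (by omega)
      have hx1 : x - 1 + 1 = x := by omega
      rw [hx1] at ih
      rw [ih, hrev]
      simp [runlen, hv]
  · rw [scanStartA, dif_neg hneg]
    have hm1 : x = -1 := by omega
    subst hm1
    simp [runlen]
termination_by (x + 1).toNat
decreasing_by omega

-- the rgt table read at a nonnegative index
theorem rgt_lookup (seg : List Int) (i : Int) (h0 : 0 ≤ i) :
    (PySem.List.pyGetD (runLengths seg) i 0 : Nat) = runlen (seg.drop i.toNat) := by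
  rw [pyGetD_nonneg_nat _ _ _ h0, runLengths_getD]

-- the lft table read at a nonnegative index ≤ len
theorem lft_lookup (seg : List Int) (i : Int) (h0 : 0 ≤ i) (hle : i ≤ (seg.length : Int)) :
    (PySem.List.pyGetD ((runLengths seg.reverse).reverse) i 0 : Nat) = runlen ((seg.take i.toNat).reverse) := by
  rw [pyGetD_nonneg_nat _ _ _ h0]
  have hlen : (runLengths seg.reverse).length = seg.length + 1 := by
    rw [runLengths_length]; simp
  have hi : i.toNat < (runLengths seg.reverse).reverse.length := by
    rw [List.length_reverse, hlen]; omega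
  have hb : (runLengths seg.reverse).length - 1 - i.toNat < (runLengths seg.reverse).length := by
    omega
  rw [List.getD_eq_getElem _ _ hi, List.getElem_reverse, ← List.getD_eq_getElem _ 0 hb,
    runLengths_getD, List.drop_reverse]
  have hn : seg.length - ((runLengths seg.reverse).length - 1 - i.toNat) = i.toNat := by omega
  rw [hn]

theorem loop_eq (arr : List (List Int)) (rn : Int) (run : Int × Int) (x : Int) (res : List (Int × Int))
    (hw : (PySem.List.pyGetD arr 0 []).length ≤ (PySem.List.pyGetD arr (rn + 1) []).length)
    (h0 : 0 ≤ x) :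
    loopA arr rn run x res =
      loopB ((PySem.List.pyGetD arr (rn + 1) []).take (PySem.List.pyGetD arr 0 []).length)
        ((runLengths ((PySem.List.pyGetD arr (rn + 1) []).take (PySem.List.pyGetD arr 0 []).length).reverse).reverse)
        (runLengths ((PySem.List.pyGetD arr (rn + 1) []).take (PySem.List.pyGetD arr 0 []).length))
        (min (((PySem.List.pyGetD arr 0 []).length : Int) - 1) (run.2 + 1)) x res := by
  by_cases hlt : x < min (((PySem.List.pyGetD arr 0 []).length : Int) - 1) (run.2 + 1)
  · have hxw : x < ((PySem.List.pyGetD arr 0 []).length : Int) - 1 := by omega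
    have hxn : x.toNat < (PySem.List.pyGetD arr 0 []).length := by omega
    have hxr : x.toNat < (PySem.List.pyGetD arr (rn + 1) []).length := by omega
    have hseglen : ((PySem.List.pyGetD arr (rn + 1) []).take (PySem.List.pyGetD arr 0 []).length).length = (PySem.List.pyGetD arr 0 []).length := by
      simp; omega
    have hgetA : PySem.List.pyGetD (PySem.List.pyGetD arr (rn + 1) []) x 0 = (PySem.List.pyGetD arr (rn + 1) [])[x.toNat] := by
      rw [pyGetD_nonneg_nat _ x 0 h0]
      simp [List.getD_eq_getElem?_getD, hxr]
    have hgetB : PySem.List.pyGetD ((PySem.List.pyGetD arr (rn + 1) []).take (PySem.List.pyGetD arr 0 []).length) x 0 = (PySem.List.pyGetD arr (rn + 1) [])[x.toNat] := by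
      rw [pyGetD_nonneg_nat _ x 0 h0]
      have hxs : x.toNat < ((PySem.List.pyGetD arr (rn + 1) []).take (PySem.List.pyGetD arr 0 []).length).length := by omega
      rw [List.getD_eq_getElem _ _ hxs]
      simp [List.getElem_take]
    rw [loopA, loopB, dif_pos hlt, dif_pos hlt]
    by_cases hz : (PySem.List.pyGetD arr (rn + 1) [])[x.toNat] ≠ 0
    · rw [if_pos (by rw [hgetA]; exact hz), if_pos (by rw [hgetB]; exact hz)]
      have hstopA : (find_connected_line arr (rn + 1) x).2 = (x + 1) + (runlen (((PySem.List.pyGetD arr (rn + 1) []).take (PySem.List.pyGetD arr 0 []).length).drop (x + 1).toNat) : Nat) := by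
        simp only [find_connected_line]
        exact stop_spec _ _ (x + 1) hw (by omega) (by omega)
      have hstopB : x + 1 + (PySem.List.pyGetD (runLengths ((PySem.List.pyGetD arr (rn + 1) []).take (PySem.List.pyGetD arr 0 []).length)) (x + 1) 0 : Nat) = (x + 1) + (runlen (((PySem.List.pyGetD arr (rn + 1) []).take (PySem.List.pyGetD arr 0 []).length).drop (x + 1).toNat) : Nat) := by
        rw [rgt_lookup _ (x + 1) (by omega)]
      have hstartA : (find_connected_line arr (rn + 1) x).1 = x - (runlen ((((PySem.List.pyGetD arr (rn + 1) []).take (PySem.List.pyGetD arr 0 []).length).take x.toNat).reverse) : Nat) := by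
        simp only [find_connected_line]
        have h := start_spec _ _ (x - 1) hw (by omega) (by omega)
        have hx1 : x - 1 + 1 = x := by omega
        rw [hx1] at h
        exact h
      have hstartB : x - (PySem.List.pyGetD ((runLengths ((PySem.List.pyGetD arr (rn + 1) []).take (PySem.List.pyGetD arr 0 []).length).reverse).reverse) x 0 : Nat) = x - (runlen ((((PySem.List.pyGetD arr (rn + 1) []).take (PySem.List.pyGetD arr 0 []).length).take x.toNat).reverse) : Nat) := by
        rw [lft_lookup _ x h0 (by omega)]
      have hstop_eq : (find_connected_line arr (rn + 1) x).2 = x + 1 + (PySem.List.pyGetD (runLengths ((PySem.List.pyGetD arr (rn + 1) []).take (PySem.List.pyGetD arr 0 []).length)) (x + 1) 0 : Nat) := by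
        rw [hstopA, hstopB]
      have hstart_eq : (find_connected_line arr (rn + 1) x).1 = x - (PySem.List.pyGetD ((runLengths ((PySem.List.pyGetD arr (rn + 1) []).take (PySem.List.pyGetD arr 0 []).length).reverse).reverse) x 0 : Nat) := by
        rw [hstartA, hstartB]
      have hrec := loop_eq arr rn run (find_connected_line arr (rn + 1) x).2
        (res ++ [find_connected_line arr (rn + 1) x]) hw (by rw [hstopA]; omega)
      rw [← hstop_eq, ← hstart_eq]
      simp only [Prod.mk.eta]
      exact hrec
    · rw [if_neg (by rw [hgetA]; exact hz), if_neg (by rw [hgetB]; exact hz)]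
      exact loop_eq arr rn run (x + 1) res hw (by omega)
  · rw [loopA, loopB, dif_neg hlt, dif_neg hlt]
termination_by (min (((PySem.List.pyGetD arr 0 []).length : Int) - 1) (run.2 + 1) - x).toNat
decreasing_by
  · have := scanStopA_gt (PySem.List.pyGetD arr (rn + 1) []) ((PySem.List.pyGetD arr 0 []).length : Int) (x + 1) (by omega)
    simp only [find_connected_line]
    omega
  · omega

-- ===== VERDICT (by name: the statement is the Claim_ definition above) =====
theorem find_connected_runs_spec : Claim_equal_find_connected_runs := by
  intro arr rn run _hdom hpre
  obtain ⟨hne, hcase⟩ := hpre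
  unfold Spec_find_connected_runs find_connected_runs find_connected_runs_alt
  by_cases hwin : min (((PySem.List.pyGetD arr 0 []).length : Int) - 1) (run.2 + 1) ≤ max 0 (run.1 - 1)
  · rw [loopA, dif_neg (by omega), if_pos hwin]
  · rw [if_neg hwin]
    rcases hcase with h | ⟨_, hw⟩
    · exact absurd h hwin
    · exact loop_eq arr rn run (max 0 (run.1 - 1)) [] hw (by omega)
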